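-- pv_equiv track=rewrite | github.com/Gijs05/IPASS | Game/Algorithm/Modes.py | remove_ships
-- ===== SOURCE A (Python) =====
-- import copy
--
-- def remove_ships(old_ships, coordinate):
--     sink = False
--     copy_ships = copy.deepcopy(old_ships)
--     for name, coordinates in old_ships.items():
--         if coordinate in coordinates:
--             coordinates.remove(coordinate)
--             old_ships[name] = coordinates
--
--     for name in old_ships.keys():
--         if len(copy_ships[name]) != len(old_ships[name]) and len(old_ships[name]) == 0:
--             sink = True
--     for ending in old_ships.values():
--         if len(ending) != 0:
--             end = False
--             break
--         else:
--             end = True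
--     return old_ships, sink, end
-- ===== SOURCE B (Python) =====
-- def remove_ships(old_ships, coordinate):
--     # One fused pass: remove the hit, track sink and game-over together.
--     # (Mutates the coordinate lists in place, like the original.)
--     sink = False
--     end = True
--     for coords in old_ships.values():
--         if coordinate in coords:
--             coords.remove(coordinate)
--             if not coords:
--                 sink = True
--         end = end and not coords
--     return old_ships, sink, end
-- ===== Notes on version B (the rewrite author's own statement) =====
-- stated objective: simpler
-- what changed: B replaces A's deepcopy plus three separate passes (remove, sink-by-length-comparison, end-with-break) by one fused pass that removes the hit and updates sink and end on the fly; no copy and no keyed re-lookups.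
-- outside the precondition, e.g. on remove_ships({}, (0, 0)): A raises UnboundLocalError, B returns ({}, False, True)
import Mathlib
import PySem

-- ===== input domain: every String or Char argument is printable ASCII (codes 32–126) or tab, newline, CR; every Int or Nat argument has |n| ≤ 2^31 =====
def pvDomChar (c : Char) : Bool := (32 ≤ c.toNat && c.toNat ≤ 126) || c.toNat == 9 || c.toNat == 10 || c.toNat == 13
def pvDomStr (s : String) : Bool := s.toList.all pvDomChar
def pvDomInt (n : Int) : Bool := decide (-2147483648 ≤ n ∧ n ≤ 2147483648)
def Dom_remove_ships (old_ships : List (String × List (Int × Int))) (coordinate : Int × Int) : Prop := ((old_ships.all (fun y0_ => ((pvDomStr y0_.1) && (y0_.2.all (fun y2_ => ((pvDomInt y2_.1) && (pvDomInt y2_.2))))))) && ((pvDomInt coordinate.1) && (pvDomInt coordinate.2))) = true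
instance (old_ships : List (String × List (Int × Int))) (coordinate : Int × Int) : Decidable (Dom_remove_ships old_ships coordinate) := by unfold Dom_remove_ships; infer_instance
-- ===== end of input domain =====

-- B drops A's deepcopy and its two follow-up passes for one fused pass (same cost class,
-- simpler); equivalence is about the RETURN value (both Pythons also mutate old_ships in place).

-- ===== PORT A =====
-- third loop of A: 'end = False; break' on the first non-empty value, else 'end = True' and
-- continue; on the empty dict 'end' is unbound (UnboundLocalError — excluded by Pre_), the
-- port returns false there
def pvEndScanA : List (String × List (Int × Int)) → Bool
  | [] => false
  | e :: rest => if e.2.length ≠ 0 then false else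
      match rest with
      | [] => true
      | _ :: _ => pvEndScanA rest

def remove_ships (old_ships : List (String × List (Int × Int))) (coordinate : Int × Int) : (List (String × List (Int × Int))) × Bool × Bool :=
  let copy_ships := old_ships   -- copy.deepcopy (value copy)
  -- first loop: 'coordinates.remove(coordinate)' and the keyed write 'old_ships[name] = coordinates';
  -- dict keys are distinct (Pre_), so the keyed write is the entry-wise update in place
  let updated := old_ships.map (fun e =>
      if e.2.contains coordinate then (e.1, (PySem.List.remove? e.2 coordinate).getD e.2) else e)
  -- second loop: 'for name in old_ships.keys()' comparing copy_ships[name] with old_ships[name];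
  -- keys distinct (Pre_), so the two keyed lookups are the entries at the same position
  let sink := (copy_ships.zip updated).foldl
      (fun sink pq => if pq.1.2.length ≠ pq.2.2.length ∧ pq.2.2.length = 0 then true else sink) false
  (updated, sink, pvEndScanA updated)

-- ===== PORT B =====
def remove_ships_alt (old_ships : List (String × List (Int × Int))) (coordinate : Int × Int) : (List (String × List (Int × Int))) × Bool × Bool :=
  old_ships.foldl
    (fun acc e =>
      if e.2.contains coordinate then
        let coords := (PySem.List.remove? e.2 coordinate).getD e.2
        (acc.1 ++ [(e.1, coords)], acc.2.1 || coords.isEmpty, acc.2.2 && coords.isEmpty)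
      else
        (acc.1 ++ [e], acc.2.1, acc.2.2 && e.2.isEmpty))
    ([], false, true)

-- ===== PRECONDITION & SPEC =====
-- Pre_ excludes the empty dict, on which Python A raises UnboundLocalError ('end' is never
-- assigned); it also states that the association list encodes a dict, i.e. its keys are
-- distinct — lists with duplicate keys do not represent any Python input of A.
def Pre_remove_ships (old_ships : List (String × List (Int × Int))) (coordinate : Int × Int) : Prop :=
  old_ships ≠ [] ∧ (old_ships.map Prod.fst).Nodup
instance (old_ships : List (String × List (Int × Int))) (coordinate : Int × Int) : Decidable (Pre_remove_ships old_ships coordinate) := by unfold Pre_remove_ships; infer_instance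
def pvWitness_remove_ships : (List (String × List (Int × Int))) × (Int × Int) := ([("a", [(0, 0)]), ("b", [(1, 1)])], (0, 0))

def Spec_remove_ships (old_ships : List (String × List (Int × Int))) (coordinate : Int × Int) (out : (List (String × List (Int × Int))) × Bool × Bool) : Prop := out = remove_ships_alt old_ships coordinate
instance (old_ships : List (String × List (Int × Int))) (coordinate : Int × Int) (out : (List (String × List (Int × Int))) × Bool × Bool) : Decidable (Spec_remove_ships old_ships coordinate out) := by unfold Spec_remove_ships; infer_instance

-- ===== CLAIM (what is proved, stated in full; the proofs are below) =====
def Claim_equal_remove_ships : Prop := ∀ (old_ships : List (String × List (Int × Int))) (coordinate : Int × Int), Dom_remove_ships old_ships coordinate → Pre_remove_ships old_ships coordinate → Spec_remove_ships old_ships coordinate (remove_ships old_ships coordinate)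

-- ===== LEMMAS AND PROOFS =====

-- the per-entry update both programs perform
def pvUpd (c : Int × Int) (e : String × List (Int × Int)) : String × List (Int × Int) :=
  if e.2.contains c then (e.1, (PySem.List.remove? e.2 c).getD e.2) else e

def pvSinkP (c : Int × Int) (e : String × List (Int × Int)) : Bool :=
  e.2.contains c && (pvUpd c e).2.isEmpty

def pvEmptyP (c : Int × Int) (e : String × List (Int × Int)) : Bool :=
  (pvUpd c e).2.isEmpty

theorem pv_len_upd (c : Int × Int) (xs : List (Int × Int)) (h : xs.contains c = true) :
    ((PySem.List.remove? xs c).getD xs).length + 1 = xs.length := by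
  have hm : c ∈ xs := by simpa using h
  have he := PySem.List.remove?_eq_some_erase (xs := xs) (v := c) hm
  have h1 := List.length_erase_of_mem hm
  have h2 : 0 < xs.length := List.length_pos_of_mem hm
  rw [he]; simp only [Option.getD_some]; omega

theorem pv_upd_eta (c : Int × Int) :
    (fun e : String × List (Int × Int) =>
        if e.2.contains c then (e.1, (PySem.List.remove? e.2 c).getD e.2) else e) = pvUpd c := by
  funext e; simp [pvUpd]

theorem pv_alt_fold (c : Int × Int) (l : List (String × List (Int × Int)))
    (out : List (String × List (Int × Int))) (s e : Bool) :
    l.foldl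
      (fun acc x =>
        if x.2.contains c then
          let coords := (PySem.List.remove? x.2 c).getD x.2
          (acc.1 ++ [(x.1, coords)], acc.2.1 || coords.isEmpty, acc.2.2 && coords.isEmpty)
        else
          (acc.1 ++ [x], acc.2.1, acc.2.2 && x.2.isEmpty))
      (out, s, e)
    = (out ++ l.map (pvUpd c), s || l.any (pvSinkP c), e && l.all (pvEmptyP c)) := by
  induction l generalizing out s e with
  | nil => simp
  | cons x l ih =>
    simp only [List.foldl_cons, List.map_cons, List.any_cons, List.all_cons]
    by_cases hx : x.2.contains c = true
    · have hm : c ∈ x.2 := by simpa using hx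
      rw [if_pos hx, ih]
      simp [pvUpd, pvSinkP, pvEmptyP, hx, hm, Bool.or_assoc, Bool.and_assoc]
    · have hm : c ∉ x.2 := by simpa using hx
      rw [if_neg hx, ih]
      simp [pvUpd, pvSinkP, pvEmptyP, hx, hm, Bool.and_assoc]

theorem pv_alt_eq (l : List (String × List (Int × Int))) (c : Int × Int) :
    remove_ships_alt l c = (l.map (pvUpd c), l.any (pvSinkP c), l.all (pvEmptyP c)) := by
  unfold remove_ships_alt
  simpa using pv_alt_fold c l [] false true

theorem pv_sink_fold (c : Int × Int) (l : List (String × List (Int × Int))) (s : Bool) :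
    (l.zip (l.map (pvUpd c))).foldl
      (fun sink pq => if pq.1.2.length ≠ pq.2.2.length ∧ pq.2.2.length = 0 then true else sink) s
    = (s || l.any (pvSinkP c)) := by
  induction l generalizing s with
  | nil => simp
  | cons x l ih =>
    have hstep : (if x.2.length ≠ (pvUpd c x).2.length ∧ (pvUpd c x).2.length = 0 then true
        else s) = (s || pvSinkP c x) := by
      by_cases hx : x.2.contains c = true
      · have hlen := pv_len_upd c x.2 hx
        have hm : c ∈ x.2 := by simpa using hx
        have hu2 : (pvUpd c x).2 = (PySem.List.remove? x.2 c).getD x.2 := by simp [pvUpd, hx, hm]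
        have hs : pvSinkP c x = ((PySem.List.remove? x.2 c).getD x.2).isEmpty := by
          simp [pvSinkP, pvUpd, hx, hm]
        rw [hu2, hs]
        by_cases hz : ((PySem.List.remove? x.2 c).getD x.2).length = 0
        · rw [if_pos ⟨by omega, hz⟩]
          have hie : ((PySem.List.remove? x.2 c).getD x.2).isEmpty = true := by
            simpa [List.isEmpty_iff_length_eq_zero] using hz
          simp [hie]
        · rw [if_neg (fun hcon => hz hcon.2)]
          have hne : (PySem.List.remove? x.2 c).getD x.2 ≠ [] := by
            intro hh; exact hz (by simp [hh])
          have hie : ((PySem.List.remove? x.2 c).getD x.2).isEmpty = false :=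
            Bool.eq_false_iff.mpr (fun hh => hne (List.isEmpty_iff.mp hh))
          simp [hie]
      · have hm : c ∉ x.2 := by simpa using hx
        have hu2 : (pvUpd c x).2 = x.2 := by simp [pvUpd, hx, hm]
        have hs : pvSinkP c x = false := by simp [pvSinkP, hx, hm]
        rw [hu2, hs]
        rw [if_neg (fun hcon => hcon.1 rfl)]
        simp
    simp only [List.map_cons, List.zip_cons_cons, List.foldl_cons, List.any_cons]
    rw [hstep, ih]
    cases s <;> cases pvSinkP c x <;> simp

theorem pv_end_scan (m : List (String × List (Int × Int))) (hm : m ≠ []) :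
    pvEndScanA m = m.all (fun e => e.2.isEmpty) := by
  induction m with
  | nil => exact absurd rfl hm
  | cons x m ih =>
    simp only [pvEndScanA, List.all_cons]
    by_cases hx : x.2.length = 0
    · have hie : x.2.isEmpty = true := by simpa [List.isEmpty_iff_length_eq_zero] using hx
      rw [if_neg (fun h => h hx), hie, Bool.true_and]
      cases m with
      | nil => rfl
      | cons y m' => exact ih (List.cons_ne_nil y m')
    · have hne : x.2 ≠ [] := by intro hh; exact hx (by simp [hh])
      have hie : x.2.isEmpty = false :=
        Bool.eq_false_iff.mpr (fun hh => hne (List.isEmpty_iff.mp hh))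
      rw [if_pos hx, hie, Bool.false_and]

theorem pv_a_eq (l : List (String × List (Int × Int))) (c : Int × Int) (hl : l ≠ []) :
    remove_ships l c = (l.map (pvUpd c), l.any (pvSinkP c), l.all (pvEmptyP c)) := by
  simp only [remove_ships]
  rw [pv_upd_eta, pv_sink_fold, pv_end_scan _ (by simpa using hl)]
  simp only [List.all_map, Bool.true_or, Prod.mk.injEq, true_and]
  exact ⟨rfl, congrArg l.all (funext fun e => by simp [pvEmptyP, Function.comp])⟩

-- ===== VERDICT (by name: the statement is the Claim_ definition above) =====
theorem remove_ships_spec : Claim_equal_remove_ships := by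
  intro old_ships coordinate _ hpre
  unfold Spec_remove_ships
  rw [pv_alt_eq, pv_a_eq _ _ hpre.1]
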